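-- pv_equiv track=rewrite | github.com/deeaion/ubb_cs | Year_2/Semester_2/Inteligenta_Artificiala/Laboratory_1/1/main.py | last_word_in_alphabetical_order_by_me
-- ===== SOURCE A (Python) =====
-- def last_word_in_alphabetical_order_by_me(text: str):
--     if not len(text):
--         raise AttributeError("Text is empty!\n")
--     parsed_text = text.split(' ')
--     last_word: str = parsed_text[0]
--     parsed_text = parsed_text[1:]
--     for word in parsed_text:
--         if word > last_word:
--             last_word = word
--     return last_word
-- ===== SOURCE B (Python) =====
-- def last_word_in_alphabetical_order_by_me(text: str):
--     if not len(text):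
--         raise AttributeError("Text is empty!\n")
--     parsed_text = text.split(' ')
--     return sorted(parsed_text)[-1]
-- ===== Notes on version B (the rewrite author's own statement) =====
-- stated objective: alternative
-- what changed: Replaces the explicit first-element-seeded linear max-comparison loop with sort-then-take-last: split on spaces, sort the pieces, return the last element.
import Mathlib
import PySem

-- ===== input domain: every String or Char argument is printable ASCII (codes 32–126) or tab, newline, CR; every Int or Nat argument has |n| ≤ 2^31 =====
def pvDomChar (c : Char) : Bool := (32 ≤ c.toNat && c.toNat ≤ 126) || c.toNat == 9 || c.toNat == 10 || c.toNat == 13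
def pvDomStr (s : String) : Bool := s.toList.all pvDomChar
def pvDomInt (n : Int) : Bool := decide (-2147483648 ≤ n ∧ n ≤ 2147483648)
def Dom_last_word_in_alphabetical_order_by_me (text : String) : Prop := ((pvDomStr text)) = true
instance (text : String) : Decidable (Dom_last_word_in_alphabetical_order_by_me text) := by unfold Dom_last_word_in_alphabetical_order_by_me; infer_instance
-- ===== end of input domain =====

-- B replaces A's seeded linear max-comparison loop with sort-then-take-last (objective: alternative).
-- ===== PORT A =====
def last_word_in_alphabetical_order_by_me (text : String) : String :=
  if PySem.Str.len text = 0 then ""  -- Python raises AttributeError here; excluded by Pre_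
  else
    let parsed_text := (PySem.Str.split? text " ").getD []
    let last_word := parsed_text.headD ""
    let parsed_text := parsed_text.tail
    parsed_text.foldl (fun last_word word => if last_word < word then word else last_word) last_word

-- ===== PORT B =====
def last_word_in_alphabetical_order_by_me_alt (text : String) : String :=
  if PySem.Str.len text = 0 then ""  -- same guard: raises AttributeError in Python; excluded by Pre_
  else
    let parsed_text := (PySem.Str.split? text " ").getD []
    PySem.List.pyGetD (PySem.List.sorted parsed_text (fun x => x) false) (-1) ""

-- ===== PRECONDITION & SPEC =====
-- A raises AttributeError exactly on the empty string; Pre_ excludes only that input.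
def Pre_last_word_in_alphabetical_order_by_me (text : String) : Prop := text ≠ ""
instance (text : String) : Decidable (Pre_last_word_in_alphabetical_order_by_me text) := by unfold Pre_last_word_in_alphabetical_order_by_me; infer_instance
def pvWitness_last_word_in_alphabetical_order_by_me : String := "b a c"
def Spec_last_word_in_alphabetical_order_by_me (text : String) (out : String) : Prop := out = last_word_in_alphabetical_order_by_me_alt text
instance (text : String) (out : String) : Decidable (Spec_last_word_in_alphabetical_order_by_me text out) := by unfold Spec_last_word_in_alphabetical_order_by_me; infer_instance

-- ===== CLAIM (what is proved, stated in full; the proofs are below) =====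
def Claim_equal_last_word_in_alphabetical_order_by_me : Prop := ∀ (text : String), Dom_last_word_in_alphabetical_order_by_me text → Pre_last_word_in_alphabetical_order_by_me text → Spec_last_word_in_alphabetical_order_by_me text (last_word_in_alphabetical_order_by_me text)

-- ===== LEMMAS AND PROOFS =====
theorem pv_splitOn_go_ne_nil (sep : List Char) (fuel : Nat) (l cur : List Char) (acc : List (List Char)) :
    PySem.Chars.splitOn.go sep fuel l cur acc ≠ [] := by
  induction fuel generalizing l cur acc with
  | zero => simp [PySem.Chars.splitOn.go]
  | succ n ih =>
    cases l with
    | nil => simp [PySem.Chars.splitOn.go]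
    | cons c rest =>
      rw [PySem.Chars.splitOn.go]
      split
      · exact ih _ _ _
      · exact ih _ _ _

theorem pv_split_ne_nil (text : String) : (PySem.Str.split? text " ").getD [] ≠ [] := by
  simp only [PySem.Str.split?, PySem.Chars.split?, PySem.Chars.splitOn]
  simp only [List.isEmpty_iff]
  norm_num
  intro h
  exact pv_splitOn_go_ne_nil _ _ _ _ _ (List.map_eq_nil_iff.mp h)

theorem pv_le_getLast_of_pairwise (l : List String) (h : l.Pairwise (· ≤ ·)) (hne : l ≠ []) (x : String) (hx : x ∈ l) : x ≤ l.getLast hne := by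
  induction l with
  | nil => simp at hx
  | cons a t ih =>
    rcases List.pairwise_cons.mp h with ⟨ha, ht⟩
    cases t with
    | nil => simp at hx; simp [hx, List.getLast]
    | cons b u =>
      rw [List.getLast_cons (by simp)]
      rcases List.mem_cons.mp hx with rfl | hx
      · exact ha _ (List.getLast_mem _)
      · exact ih ht (by simp) hx

-- A's fold over a nonempty list = the last element of Python's stable sort of that list
theorem pv_fold_eq_sorted_last (x : String) (xs : List String) :
    xs.foldl (fun a w => if a < w then w else a) x
      = PySem.List.pyGetD (PySem.List.sorted (x :: xs) (fun y => y) false) (-1) "" := by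
  have hstep : (fun (a w : String) => if a < w then w else a) = max := by
    funext a w
    rcases lt_trichotomy a w with h|h|h
    · simp [h, max_eq_right h.le]
    · simp [h]
    · simp [not_lt.mpr h.le, max_eq_left h.le]
  have hsne : PySem.List.sorted (x :: xs) (fun y => y) false ≠ [] := by
    intro h
    exact (List.cons_ne_nil x xs) ((PySem.List.sorted_eq_nil_iff _ _ _).mp h)
  rw [hstep, PySem.List.pyGetD_neg_one _ _ hsne]
  -- both sides are THE maximum of x :: xs
  have hmax : (x :: xs).max? = some (xs.foldl max x) := List.max?_cons'
  have hperm : (PySem.List.sorted (x :: xs) (fun y => y) false).Perm (x :: xs) :=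
    PySem.List.sorted_perm _ _ _
  have hpw : (PySem.List.sorted (x :: xs) (fun y => y) false).Pairwise (· ≤ ·) :=
    PySem.List.sorted_pairwise _ _
  have hmax2 : (x :: xs).max? = some ((PySem.List.sorted (x :: xs) (fun y => y) false).getLast hsne) := by
    rw [List.max?_eq_some_iff]
    constructor
    · exact hperm.mem_iff.mp (List.getLast_mem hsne)
    · intro b hb
      exact pv_le_getLast_of_pairwise _ hpw hsne b (hperm.mem_iff.mpr hb)
  have := hmax.symm.trans hmax2
  exact Option.some.inj this

-- ===== VERDICT (by name: the statement is the Claim_ definition above) =====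
theorem last_word_in_alphabetical_order_by_me_spec : Claim_equal_last_word_in_alphabetical_order_by_me := by
  intro text _ hpre
  unfold Spec_last_word_in_alphabetical_order_by_me
  unfold last_word_in_alphabetical_order_by_me last_word_in_alphabetical_order_by_me_alt
  have hlen : ¬ PySem.Str.len text = 0 := by
    simp [PySem.Str.len_eq]
    intro h
    exact hpre (by cases text; simp_all)
  simp only [hlen, ite_false]
  obtain ⟨x, xs, hx⟩ : ∃ x xs, (PySem.Str.split? text " ").getD [] = x :: xs := by
    rcases h : (PySem.Str.split? text " ").getD [] with _ | ⟨x, xs⟩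
    · exact absurd h (pv_split_ne_nil text)
    · exact ⟨x, xs, rfl⟩
  simp only [hx, List.headD_cons, List.tail_cons]
  exact pv_fold_eq_sorted_last x xs
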